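-- pv_equiv track=rewrite | github.com/Pritz69/LeetCode-Solutions | 2478-longest-nice-subarray/2478-longest-nice-subarray.py | _can_form_nice_subarray
-- ===== SOURCE A (Python) =====
-- def _can_form_nice_subarray(length: int, nums: list[int]) -> bool:
--     if length <= 1:
--         return True
--
--     for start in range(len(nums) - length + 1):
--         bit_mask = 0
--         is_nice = True
--
--         for pos in range(start, start + length):
--
--             if bit_mask & nums[pos] != 0:
--                 is_nice = False
--                 break
--             bit_mask |= nums[pos]
--
--         if is_nice:
--             return True
--
--     return False
-- ===== SOURCE B (Python) =====
-- def _can_form_nice_subarray(length: int, nums: list[int]) -> bool: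
--     if length <= 1:
--         return True
--     mask = 0
--     left = 0
--     for right, x in enumerate(nums):
--         while mask & x:
--             mask ^= nums[left]
--             left += 1
--         mask |= x
--         if right - left + 1 >= length:
--             return True
--     return False
-- ===== Notes on version B (the rewrite author's own statement) =====
-- stated objective: alternative
-- what changed: Replaced the restart-per-start nested window scan (each candidate window re-checked from scratch with a fresh bit mask) by the classic two-pointer sliding window that maintains the OR-mask of the current pairwise-bit-disjoint window, evicting from the left via XOR, and succeeds as soon as the window reaches the requested length.
import Mathlib
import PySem

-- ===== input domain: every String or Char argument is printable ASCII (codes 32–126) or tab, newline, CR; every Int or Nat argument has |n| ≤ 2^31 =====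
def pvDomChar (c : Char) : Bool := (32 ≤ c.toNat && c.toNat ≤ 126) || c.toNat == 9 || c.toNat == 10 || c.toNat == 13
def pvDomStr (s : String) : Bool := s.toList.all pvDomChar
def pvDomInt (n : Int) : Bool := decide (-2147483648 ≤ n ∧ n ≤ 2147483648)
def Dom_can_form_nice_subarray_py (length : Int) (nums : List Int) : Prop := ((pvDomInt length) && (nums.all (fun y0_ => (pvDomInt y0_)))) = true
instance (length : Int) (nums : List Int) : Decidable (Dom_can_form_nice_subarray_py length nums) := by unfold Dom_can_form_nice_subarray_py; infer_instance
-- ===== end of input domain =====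

-- B replaces A's restart-per-start nested window scan by a two-pointer sliding window
-- (OR-mask of the current pairwise-bit-disjoint window, left eviction by XOR); equal return value proved below.

-- ===== PORT A =====
-- inner-loop body of A: state (bit_mask, is_nice); once is_nice is false the loop has broken out
def pvAInnerStep (st : Int × Bool) (x : Int) : Int × Bool :=
  if st.2 then
    (if PySem.Int.band st.1 x ≠ 0 then (st.1, false) else (PySem.Int.bor st.1 x, true))
  else st

def can_form_nice_subarray_py (length : Int) (nums : List Int) : Bool :=
  if length ≤ 1 then true
  else
    (PySem.List.pyRange 0 ((nums.length : Int) - length + 1) 1).any (fun start =>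
      ((PySem.List.pyRange start (start + length) 1).foldl
        (fun st pos => pvAInnerStep st (PySem.List.pyGetD nums pos 0)) (0, true)).2)

-- ===== PORT B =====
-- the `while mask & x: mask ^= nums[left]; left += 1` loop of B; fuel right - left makes it
-- structural (the Python loop stops no later: when left reaches right the mask is 0)
def pvShrink (nums : List Int) (x : Int) : Nat → Int → Nat → Int × Nat
  | 0, mask, left => (mask, left)
  | fuel+1, mask, left =>
    if PySem.Int.band mask x ≠ 0 then
      pvShrink nums x fuel (PySem.Int.bxor mask (PySem.List.pyGetD nums (left : Int) 0)) (left + 1)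
    else (mask, left)

-- B's `for right, x in enumerate(nums)` loop
def pvBGo (nums : List Int) (length : Int) : List Int → Nat → Nat → Int → Bool
  | [], _, _, _ => false
  | x :: rest, right, left, mask =>
    let p := pvShrink nums x (right - left) mask left
    if length ≤ (right : Int) - (p.2 : Int) + 1 then true
    else pvBGo nums length rest (right + 1) p.2 (PySem.Int.bor p.1 x)

def can_form_nice_subarray_py_alt (length : Int) (nums : List Int) : Bool :=
  if length ≤ 1 then true
  else pvBGo nums length nums 0 0 0

-- ===== PRECONDITION & SPEC =====
def Spec_can_form_nice_subarray_py (length : Int) (nums : List Int) (out : Bool) : Prop := out = can_form_nice_subarray_py_alt length nums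
instance (length : Int) (nums : List Int) (out : Bool) : Decidable (Spec_can_form_nice_subarray_py length nums out) := by unfold Spec_can_form_nice_subarray_py; infer_instance

-- ===== CLAIM (what is proved, stated in full; the proofs are below) =====
def Claim_equal_can_form_nice_subarray_py : Prop := ∀ (length : Int) (nums : List Int), Dom_can_form_nice_subarray_py length nums → Spec_can_form_nice_subarray_py length nums (can_form_nice_subarray_py length nums)

-- ===== LEMMAS AND PROOFS =====
lemma pvAddOr (m n : Nat) (h : m &&& n = 0) : m + n = m ||| n := by
  induction m using Nat.strong_induction_on generalizing n with
  | _ m ih =>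
    rcases Nat.eq_zero_or_pos m with hm | hm
    · simp [hm]
    · have hd : m / 2 &&& n / 2 = 0 := by
        rw [← Nat.and_div_two, h]
      have ihm := ih (m / 2) (Nat.div_lt_self hm (by norm_num)) (n / 2) hd
      have hor2 : (m ||| n) / 2 = m / 2 ||| n / 2 := Nat.or_div_two
      have hpar : ¬ (m % 2 = 1 ∧ n % 2 = 1) := by
        intro hc
        have : (m &&& n) % 2 = 1 := Nat.and_mod_two_eq_one.mpr hc
        simp [h] at this
      have hor1 : (m ||| n) % 2 = 1 ↔ (m % 2 = 1 ∨ n % 2 = 1) := Nat.or_mod_two_eq_one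
      have e1 := Nat.div_add_mod m 2
      have e2 := Nat.div_add_mod n 2
      have e3 := Nat.div_add_mod (m ||| n) 2
      have h1 : m % 2 < 2 := Nat.mod_lt _ (by norm_num)
      have h2 : n % 2 < 2 := Nat.mod_lt _ (by norm_num)
      have h3 : (m ||| n) % 2 < 2 := Nat.mod_lt _ (by norm_num)
      omega

lemma pvSubAnd (m n : Nat) : m - (m &&& n) = m.ldiff n := by
  have h1 : (m &&& n) &&& (m.ldiff n) = 0 := by
    apply Nat.eq_of_testBit_eq
    intro k
    simp [Nat.testBit_and, Nat.testBit_ldiff]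
    tauto
  have h2 : (m &&& n) ||| (m.ldiff n) = m := by
    apply Nat.eq_of_testBit_eq
    intro k
    simp [Nat.testBit_or, Nat.testBit_and, Nat.testBit_ldiff]
    cases m.testBit k <;> cases n.testBit k <;> simp
  have := pvAddOr (m &&& n) (m.ldiff n) h1
  omega

lemma pvIntExt {a b : Int} (h : ∀ k, a.testBit k = b.testBit k) : a = b := by
  have big : ∀ p q : Nat, (∀ k, Nat.testBit p k = !Nat.testBit q k) → False := by
    intro p q hk
    have hp : Nat.testBit p (p + q) = false := Nat.testBit_lt_two_pow (by
      calc p < 2 ^ p := Nat.lt_two_pow_self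
        _ ≤ 2 ^ (p + q) := Nat.pow_le_pow_right (by norm_num) (by omega))
    have hq : Nat.testBit q (p + q) = false := Nat.testBit_lt_two_pow (by
      calc q < 2 ^ q := Nat.lt_two_pow_self
        _ ≤ 2 ^ (p + q) := Nat.pow_le_pow_right (by norm_num) (by omega))
    have := hk (p + q)
    rw [hp, hq] at this
    simp at this
  cases a with
  | ofNat m =>
    cases b with
    | ofNat n =>
      have : m = n := Nat.eq_of_testBit_eq fun k => h k
      simp [this]
    | negSucc n => exact absurd (fun k => h k) (big m n)
  | negSucc m =>
    cases b with
    | ofNat n =>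
      exact absurd (fun k => (h k).symm) (big n m)
    | negSucc n =>
      have : m = n := Nat.eq_of_testBit_eq fun k => by
        have := h k
        simp [Int.testBit] at this
        exact this
      simp [this]

lemma pvBandEq (a b : Int) : PySem.Int.band a b = Int.land a b := by
  have hno : ∀ k : Nat, ¬((k:Int) ≤ -1) := by intro k; omega
  cases a with
  | ofNat m =>
    cases b with
    | ofNat n => simp [PySem.Int.band, Int.land]
    | negSucc n =>
      simp [PySem.Int.band, Int.land, Int.negSucc_eq, hno, pvSubAnd]
  | negSucc m =>
    cases b with
    | ofNat n =>
      simp [PySem.Int.band, Int.land, Int.negSucc_eq, hno, pvSubAnd]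
    | negSucc n =>
      simp [PySem.Int.band, Int.land, Int.negSucc_eq, hno]
      ring

lemma pvBorEq (a b : Int) : PySem.Int.bor a b = Int.lor a b := by
  have hno : ∀ k : Nat, ¬((k:Int) ≤ -1) := by intro k; omega
  cases a with
  | ofNat m =>
    cases b with
    | ofNat n => simp [PySem.Int.bor, Int.lor]
    | negSucc n =>
      simp [PySem.Int.bor, Int.lor, Int.negSucc_eq, hno, pvSubAnd]
      ring
  | negSucc m =>
    cases b with
    | ofNat n =>
      simp [PySem.Int.bor, Int.lor, Int.negSucc_eq, hno, pvSubAnd]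
      ring
    | negSucc n =>
      simp [PySem.Int.bor, Int.lor, Int.negSucc_eq, hno]
      ring

lemma pvBxorEq (a b : Int) : PySem.Int.bxor a b = Int.xor a b := by
  have hno : ∀ k : Nat, ¬((k:Int) ≤ -1) := by intro k; omega
  cases a with
  | ofNat m =>
    cases b with
    | ofNat n => simp [PySem.Int.bxor, Int.xor]
    | negSucc n =>
      simp [PySem.Int.bxor, Int.xor, Int.negSucc_eq, hno]
      ring
  | negSucc m =>
    cases b with
    | ofNat n =>
      simp [PySem.Int.bxor, Int.xor, Int.negSucc_eq, hno]
      ring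
    | negSucc n =>
      simp [PySem.Int.bxor, Int.xor, Int.negSucc_eq, hno]

lemma pvZeroIff (t : Int) : t = 0 ↔ ∀ k, t.testBit k = false := by
  constructor
  · rintro rfl k
    simp [Int.testBit]
  · intro h
    apply pvIntExt
    intro k
    rw [h k]
    simp [Int.testBit]

lemma pvBandOr (x a b : Int) :
    PySem.Int.band x (PySem.Int.bor a b) = 0 ↔
      PySem.Int.band x a = 0 ∧ PySem.Int.band x b = 0 := by
  rw [pvBandEq, pvBandEq, pvBandEq, pvBorEq]
  simp only [pvZeroIff, Int.testBit_land, Int.testBit_lor]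
  constructor
  · intro h
    constructor <;> intro k <;> have := h k <;>
      cases hx : Int.testBit x k <;> cases ha : Int.testBit a k <;>
      cases hb : Int.testBit b k <;> simp_all
  · rintro ⟨h1, h2⟩ k
    have := h1 k
    have := h2 k
    cases hx : Int.testBit x k <;> cases ha : Int.testBit a k <;>
      cases hb : Int.testBit b k <;> simp_all

lemma pvRemove (a b : Int) (h : PySem.Int.band a b = 0) :
    PySem.Int.bxor (PySem.Int.bor a b) a = b := by
  rw [pvBandEq] at h
  rw [pvBxorEq, pvBorEq]
  apply pvIntExt
  intro k
  have hk : Int.testBit (Int.land a b) k = false := by rw [h]; simp [Int.testBit]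
  rw [Int.testBit_land] at hk
  rw [Int.testBit_lxor, Int.testBit_lor]
  cases ha : Int.testBit a k <;> cases hb : Int.testBit b k <;> simp_all

lemma pvBorAssoc (a b c : Int) :
    PySem.Int.bor (PySem.Int.bor a b) c = PySem.Int.bor a (PySem.Int.bor b c) := by
  simp only [pvBorEq]
  apply pvIntExt
  intro k
  simp only [Int.testBit_lor, Bool.or_assoc]

def pvDisj (a b : Int) : Prop := PySem.Int.band a b = 0
def pvOrL (l : List Int) : Int := l.foldl PySem.Int.bor 0
def pvWin (nums : List Int) (l r : Nat) : List Int := (nums.drop l).take (r - l)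
def pvNice (nums : List Int) (l r : Nat) : Prop := (pvWin nums l r).Pairwise pvDisj

lemma pvBorZeroLeft (x : Int) : PySem.Int.bor 0 x = x := by
  rw [PySem.Int.bor_comm]; exact PySem.Int.bor_zero x

lemma pvFoldBorInit (w : List Int) (i : Int) :
    w.foldl PySem.Int.bor i = PySem.Int.bor i (pvOrL w) := by
  induction w generalizing i with
  | nil => simp [pvOrL]
  | cons x w ih =>
    simp only [pvOrL, List.foldl_cons] at *
    rw [ih (PySem.Int.bor i x), ih (PySem.Int.bor 0 x), pvBorZeroLeft, pvBorAssoc]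

lemma pvOrLCons (x : Int) (w : List Int) : pvOrL (x :: w) = PySem.Int.bor x (pvOrL w) := by
  simp only [pvOrL, List.foldl_cons, pvBorZeroLeft]
  exact pvFoldBorInit w x

lemma pvOrLSnoc (w : List Int) (x : Int) : pvOrL (w ++ [x]) = PySem.Int.bor (pvOrL w) x := by
  simp [pvOrL, List.foldl_append]

lemma pvBandOrL (x : Int) (w : List Int) :
    PySem.Int.band x (pvOrL w) = 0 ↔ ∀ y ∈ w, PySem.Int.band x y = 0 := by
  induction w with
  | nil => simp [pvOrL, PySem.Int.band_zero]
  | cons y w ih =>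
    rw [pvOrLCons, pvBandOr, ih]
    simp

lemma pvWinHead (nums : List Int) {l r : Nat} (h1 : l < r) (h2 : l < nums.length) :
    pvWin nums l r = nums[l] :: pvWin nums (l + 1) r := by
  simp only [pvWin]
  rw [show r - l = (r - (l + 1)) + 1 by omega]
  rw [List.drop_eq_getElem_cons h2, List.take_succ_cons]

lemma pvWinSnoc (nums : List Int) {l r : Nat} (hlr : l ≤ r) (hr : r < nums.length) :
    pvWin nums l (r + 1) = pvWin nums l r ++ [nums[r]] := by
  simp only [pvWin]
  rw [show r + 1 - l = (r - l) + 1 by omega, List.take_add_one]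
  congr 1
  have hlen : r - l < (nums.drop l).length := by simp; omega
  rw [List.getElem?_eq_getElem hlen]
  simp [List.getElem_drop]
  congr 1
  omega

lemma pvWinDrop (nums : List Int) {l l' r : Nat} (h : l ≤ l') :
    pvWin nums l' r = (pvWin nums l r).drop (l' - l) := by
  simp only [pvWin]
  rw [List.drop_take, List.drop_drop]
  rw [show l + (l' - l) = l' by omega]
  rcases Nat.le_total l' r with hc | hc
  · rw [show r - l - (l' - l) = r - l' by omega]
  · rw [show r - l' = 0 by omega]
    rw [show r - l - (l' - l) = 0 by omega]

lemma pvNiceMono (nums : List Int) {l l' r : Nat} (h : l ≤ l') :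
    pvNice nums l r → pvNice nums l' r := by
  intro hn
  rw [pvNice, pvWinDrop nums h]
  exact hn.sublist (List.drop_sublist _ _)

lemma pvNicePrefix (nums : List Int) {l r : Nat} :
    pvNice nums l (r + 1) → pvNice nums l r := by
  intro hn
  have : pvWin nums l r = (pvWin nums l (r + 1)).take (r - l) := by
    simp only [pvWin, List.take_take]
    congr 1
    omega
  rw [pvNice, this]
  exact hn.sublist (List.take_sublist _ _)


lemma pvFoldFalse (w : List Int) (m : Int) :
    w.foldl pvAInnerStep (m, false) = (m, false) := by
  induction w with
  | nil => rfl
  | cons x w ih => simpa [pvAInnerStep] using ih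

lemma pvChain (w : List Int) (m : Int) :
    ((w.foldl pvAInnerStep (m, true)).2 = true) ↔
      ((∀ y ∈ w, PySem.Int.band m y = 0) ∧ w.Pairwise pvDisj) := by
  induction w generalizing m with
  | nil => simp
  | cons x w ih =>
    have split : ∀ y : Int, PySem.Int.band (PySem.Int.bor m x) y = 0 ↔
        (PySem.Int.band m y = 0 ∧ PySem.Int.band x y = 0) := by
      intro y
      rw [PySem.Int.band_comm, pvBandOr, PySem.Int.band_comm y m, PySem.Int.band_comm y x]
    by_cases hx : PySem.Int.band m x = 0
    · rw [List.foldl_cons, show pvAInnerStep (m, true) x = (PySem.Int.bor m x, true) by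
        simp [pvAInnerStep, hx]]
      rw [ih]
      constructor
      · rintro ⟨h1, h2⟩
        refine ⟨?_, List.pairwise_cons.mpr ⟨fun y hy => ((split y).mp (h1 y hy)).2, h2⟩⟩
        intro y hy
        rcases List.mem_cons.mp hy with rfl | hy
        · exact hx
        · exact ((split y).mp (h1 y hy)).1
      · rintro ⟨h1, h2⟩
        have h2' := List.pairwise_cons.mp h2
        exact ⟨fun y hy => (split y).mpr
          ⟨h1 y (List.mem_cons_of_mem x hy), h2'.1 y hy⟩, h2'.2⟩
    · rw [List.foldl_cons, show pvAInnerStep (m, true) x = (m, false) by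
        simp [pvAInnerStep, hx]]
      rw [pvFoldFalse]
      simp only [Bool.false_eq_true, false_iff]
      rintro ⟨h1, _⟩
      exact hx (h1 x (List.mem_cons_self))

lemma pvInnerWin (nums : List Int) (start L : Int) (h0 : 0 ≤ start) (hL : 0 ≤ L)
    (hend : start.toNat + L.toNat ≤ nums.length) :
    (PySem.List.pyRange start (start + L) 1).map (fun pos => PySem.List.pyGetD nums pos 0) =
      pvWin nums start.toNat (start.toNat + L.toNat) := by
  rw [PySem.List.pyRange_one, List.map_map]
  rw [show start + L - start = L by ring]
  apply List.ext_getElem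
  · simp [pvWin]
    omega
  · intro i hi1 hi2
    simp only [List.getElem_map, List.getElem_range, Function.comp_apply]
    have hilen : i < L.toNat := by simpa using hi1
    have hidx : (0:Int) ≤ start + i := by omega
    have hidx2 : start + (i:Int) < (nums.length : Int) := by omega
    rw [PySem.List.pyGetD_eq_getElem nums 0 hidx (by simpa using hidx2)]
    simp only [pvWin, List.getElem_take, List.getElem_drop]
    congr 1
    omega


lemma pvAIff (L : Int) (nums : List Int) (hL : ¬ L ≤ 1) :
    can_form_nice_subarray_py L nums = true ↔
      ∃ s : Nat, s + L.toNat ≤ nums.length ∧ pvNice nums s (s + L.toNat) := by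
  have hL0 : (0:Int) ≤ L := by omega
  rw [can_form_nice_subarray_py, if_neg hL, List.any_eq_true]
  constructor
  · rintro ⟨start, hmem, hf⟩
    have hb := PySem.List.mem_pyRange_one.mp hmem
    have h0 : (0:Int) ≤ start := hb.1
    have hend : start.toNat + L.toNat ≤ nums.length := by omega
    rw [← List.foldl_map,
      pvInnerWin nums start L h0 hL0 hend, pvChain] at hf
    exact ⟨start.toNat, hend, hf.2⟩
  · rintro ⟨s, hend, hnice⟩
    refine ⟨(s : Int), PySem.List.mem_pyRange_one.mpr ⟨by omega, by omega⟩, ?_⟩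
    rw [← List.foldl_map,
      pvInnerWin nums (s : Int) L (by omega) hL0 (by simpa using hend), pvChain]
    refine ⟨fun y _ => by rw [PySem.Int.band_comm]; exact PySem.Int.band_zero y, ?_⟩
    simpa using hnice

lemma pvWinNil (nums : List Int) (l : Nat) : pvWin nums l l = [] := by
  simp [pvWin]


lemma pvDisjAllIff (w : List Int) (x : Int) :
    PySem.Int.band (pvOrL w) x = 0 ↔ ∀ y ∈ w, pvDisj y x := by
  rw [PySem.Int.band_comm, pvBandOrL]
  unfold pvDisj
  constructor
  · intro h y hy; rw [PySem.Int.band_comm]; exact h y hy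
  · intro h y hy; rw [PySem.Int.band_comm]; exact h y hy

lemma pvNiceSnocIff (nums : List Int) {l r : Nat} (hlr : l ≤ r) (hr : r < nums.length) :
    pvNice nums l (r + 1) ↔
      (pvNice nums l r ∧ PySem.Int.band (pvOrL (pvWin nums l r)) (nums[r]) = 0) := by
  rw [pvNice, pvWinSnoc nums hlr hr, List.pairwise_append, pvDisjAllIff]
  constructor
  · rintro ⟨h1, _, h3⟩
    exact ⟨h1, fun y hy => h3 y hy (nums[r]) (List.mem_singleton.mpr rfl)⟩
  · rintro ⟨h1, h2⟩
    exact ⟨h1, List.pairwise_singleton _ _, fun a ha b hb => by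
      rw [List.mem_singleton.mp hb]; exact h2 a ha⟩

lemma pvShrinkSpec (nums : List Int) {right : Nat} (hr : right < nums.length) :
    ∀ (fuel : Nat) (mask : Int) (left : Nat), fuel = right - left → left ≤ right →
      mask = pvOrL (pvWin nums left right) → pvNice nums left right →
      (∀ l : Nat, pvNice nums l (right + 1) → left ≤ l) →
      (pvShrink nums (nums[right]) fuel mask left).2 ≤ right ∧
      (pvShrink nums (nums[right]) fuel mask left).1 =
        pvOrL (pvWin nums (pvShrink nums (nums[right]) fuel mask left).2 right) ∧
      pvNice nums (pvShrink nums (nums[right]) fuel mask left).2 right ∧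
      PySem.Int.band (pvShrink nums (nums[right]) fuel mask left).1 (nums[right]) = 0 ∧
      (∀ l : Nat, pvNice nums l (right + 1) → (pvShrink nums (nums[right]) fuel mask left).2 ≤ l) := by
  intro fuel
  induction fuel with
  | zero =>
    intro mask left hfuel hlr hmask hnice hmin
    have hl : left = right := by omega
    subst hl
    rw [pvWinNil] at hmask
    simp only [pvShrink]
    refine ⟨hlr, hmask ▸ by rw [pvWinNil], hnice, ?_, hmin⟩
    rw [hmask]
    show PySem.Int.band (pvOrL []) _ = 0
    rw [show pvOrL [] = 0 from rfl, PySem.Int.band_comm]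
    exact PySem.Int.band_zero _
  | succ fuel ih =>
    intro mask left hfuel hlr hmask hnice hmin
    by_cases hc : PySem.Int.band mask (nums[right]) = 0
    · have hstep : pvShrink nums (nums[right]) (fuel + 1) mask left = (mask, left) := by
        simp [pvShrink, hc]
      rw [hstep]
      exact ⟨hlr, hmask, hnice, hc, hmin⟩
    · have hlneq : left ≠ right := by
        rintro rfl
        rw [pvWinNil] at hmask
        apply hc
        rw [hmask, show pvOrL [] = 0 from rfl, PySem.Int.band_comm]
        exact PySem.Int.band_zero _
      have hlt : left < right := by omega
      have hln : left < nums.length := by omega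
      have hhead := pvWinHead nums hlt hln
      have hn2 := hnice
      rw [pvNice, hhead, List.pairwise_cons] at hn2
      have hrest : PySem.Int.band (nums[left]) (pvOrL (pvWin nums (left + 1) right)) = 0 := by
        rw [pvBandOrL]
        intro y hy
        exact hn2.1 y hy
      have hmask' : PySem.Int.bxor mask (nums[left]) = pvOrL (pvWin nums (left + 1) right) := by
        rw [hmask, hhead, pvOrLCons]
        exact pvRemove _ _ hrest
      have hget : PySem.List.pyGetD nums (left : Int) 0 = nums[left] := by
        rw [PySem.List.pyGetD_eq_getElem nums 0 (by omega) (by exact_mod_cast hln)]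
        simp
      have hmin' : ∀ l : Nat, pvNice nums l (right + 1) → left + 1 ≤ l := by
        intro l hl
        have h1 := hmin l hl
        rcases Nat.lt_or_ge left l with h | h
        · omega
        · have hl2 : l = left := by omega
          subst hl2
          exfalso
          apply hc
          rw [hmask]
          exact ((pvNiceSnocIff nums hlr hr).mp hl).2
      simp only [pvShrink, hc, ne_eq, not_false_eq_true, if_true, hget]
      exact ih (PySem.Int.bxor mask (nums[left])) (left + 1) (by omega) (by omega)
        (hmask') hn2.2 hmin'


lemma pvBGoSpec (nums : List Int) (L : Int) (hL : ¬ L ≤ 1) :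
    ∀ (suffix : List Int) (right left : Nat) (mask : Int), suffix = nums.drop right →
      left ≤ right → right ≤ nums.length →
      mask = pvOrL (pvWin nums left right) → pvNice nums left right →
      (∀ l : Nat, pvNice nums l right → left ≤ l) →
      (pvBGo nums L suffix right left mask = true ↔
        ∃ s : Nat, s + L.toNat ≤ nums.length ∧ right < s + L.toNat ∧ pvNice nums s (s + L.toNat)) := by
  intro suffix
  induction suffix with
  | nil =>
    intro right left mask hsuf hlr hrn hmask hnice hmin
    have hge : nums.length ≤ right := by
      by_contra hcon
      rw [not_le] at hcon
      have := congrArg List.length hsuf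
      simp at this
      omega
    simp only [pvBGo, Bool.false_eq_true, false_iff]
    rintro ⟨s, h1, h2, _⟩
    omega
  | cons x rest ih =>
    intro right left mask hsuf hlr hrn hmask hnice hmin
    have hr : right < nums.length := by
      by_contra hcon
      rw [not_lt] at hcon
      rw [List.drop_eq_nil_of_le hcon] at hsuf
      exact List.cons_ne_nil x rest hsuf
    have hdrop := List.drop_eq_getElem_cons hr
    rw [hdrop] at hsuf
    obtain ⟨hx, hrest⟩ := List.cons.inj hsuf
    have hmin1 : ∀ l : Nat, pvNice nums l (right + 1) → left ≤ l :=
      fun l hl => hmin l (pvNicePrefix nums hl)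
    have hsh := pvShrinkSpec nums hr (right - left) mask left rfl hlr hmask hnice hmin1
    obtain ⟨s1, s2, s3, s4, s5⟩ := hsh
    subst hx
    set p := pvShrink nums (nums[right]) (right - left) mask left with hp
    have hnice1 : pvNice nums p.2 (right + 1) := (pvNiceSnocIff nums s1 hr).mpr ⟨s3, s2 ▸ s4⟩
    simp only [pvBGo]
    rw [← hp]
    by_cases ht : L ≤ (right : Int) - (p.2 : Int) + 1
    · rw [if_pos ht]
      simp only [true_iff]
      have hLt : L.toNat ≤ right + 1 - p.2 := by omega
      refine ⟨right + 1 - L.toNat, by omega, by omega, ?_⟩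
      have hs : right + 1 - L.toNat + L.toNat = right + 1 := by omega
      rw [hs]
      exact pvNiceMono nums (by omega) hnice1
    · rw [if_neg ht]
      rw [ih (right + 1) p.2 (PySem.Int.bor p.1 (nums[right])) hrest (by omega) (by omega)
        (by rw [s2, ← pvOrLSnoc, ← pvWinSnoc nums s1 hr]) hnice1 s5]
      constructor
      · rintro ⟨s, h1, h2, h3⟩
        exact ⟨s, h1, by omega, h3⟩
      · rintro ⟨s, h1, h2, h3⟩
        refine ⟨s, h1, ?_, h3⟩
        rcases Nat.lt_or_ge (right + 1) (s + L.toNat) with h | h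
        · exact h
        · exfalso
          have hseq : s + L.toNat = right + 1 := by omega
          have := s5 s (hseq ▸ h3)
          omega

-- ===== VERDICT (by name: the statement is the Claim_ definition above) =====
theorem can_form_nice_subarray_py_spec : Claim_equal_can_form_nice_subarray_py := by
  intro L nums _
  unfold Spec_can_form_nice_subarray_py
  by_cases hL : L ≤ 1
  · simp [can_form_nice_subarray_py, can_form_nice_subarray_py_alt, hL]
  · have hA := pvAIff L nums hL
    have hB := pvBGoSpec nums L hL nums 0 0 0 (by simp) (le_refl 0) (Nat.zero_le _)
      (by simp [pvWinNil, pvOrL]) (by simp [pvNice, pvWinNil]) (fun l _ => Nat.zero_le l)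
    have hgt : (1 : Int) < L := lt_of_not_ge (by simpa using hL)
    have hL2 : 2 ≤ L.toNat := by omega
    have : can_form_nice_subarray_py L nums = true ↔ can_form_nice_subarray_py_alt L nums = true := by
      rw [hA]
      unfold can_form_nice_subarray_py_alt
      rw [if_neg hL, hB]
      constructor
      · rintro ⟨s, h1, h2⟩; exact ⟨s, h1, by omega, h2⟩
      · rintro ⟨s, h1, _, h2⟩; exact ⟨s, h1, h2⟩
    cases hx : can_form_nice_subarray_py L nums <;>
      cases hy : can_form_nice_subarray_py_alt L nums <;> simp_all
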